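-- pv_equiv track=rewrite | github.com/b-chae/AlgorithmStudy | programmers/210912.py | solution
-- ===== SOURCE A (Python) =====
-- def solution(id_list, reports, k):
--   answer = []
--
--   cross_check = {}
--   count = {}
--   for i in range(len(id_list)):
--     cross_check[id_list[i]] = {}
--     cross_check[id_list[i]]['#'] = 0
--     count[id_list[i]] = []
--
--   for report in reports:
--     reporter = report.split()[0]
--     reported = report.split()[1]
--
--     if reported not in cross_check[reporter]:
--       cross_check[reporter][reported] = True
--       count[reported].append(reporter)
--
--   answer = []
--
--   for id in id_list:
--     if len(count[id]) >= k:
--       for reporter in count[id]: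
--         cross_check[reporter]['#'] += 1
--
--   for id in id_list:
--     answer.append(cross_check[id]['#'])
--
--   return answer
-- ===== SOURCE B (Python) =====
-- def solution(id_list, reports, k):
--     seen = set()
--     votes = {}          # reported id -> number of distinct reporters
--     targets = {}        # reporter -> his distinct reported ids, in first-report order
--     for r in reports:
--         t = r.split()
--         pair = (t[0], t[1])
--         if pair not in seen:
--             seen.add(pair)
--             votes[t[1]] = votes.get(t[1], 0) + 1
--             targets.setdefault(t[0], []).append(t[1])
--     return [sum(1 for red in targets.get(i, []) if votes[red] >= k) for i in id_list]
-- ===== Notes on version B (the rewrite author's own statement) =====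
-- stated objective: simpler
-- what changed: B replaces A's dict-of-dicts with a sentinel '#' counter key and its banned-side increment passes by a single dedup pass building a vote counter and per-reporter target lists, then computes each user's answer directly by counting their targets with enough votes.
-- intended difference: On reports whose reported id is the literal '#' (which collides with the key A stores its counters under) with at least k distinct reporters, A silently ignores those reports and returns tallies without them, while B counts them normally; B's value is the intended one. — e.g. on solution(["a", "#"], ["a #"], 1): A returns [0, 0], B returns [1, 0]
-- outside the precondition, e.g. on solution(['a', 'a', 'b'], ['b a'], 1): A returns [0, 0, 2], B returns [0, 0, 1]
import Mathlib
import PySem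

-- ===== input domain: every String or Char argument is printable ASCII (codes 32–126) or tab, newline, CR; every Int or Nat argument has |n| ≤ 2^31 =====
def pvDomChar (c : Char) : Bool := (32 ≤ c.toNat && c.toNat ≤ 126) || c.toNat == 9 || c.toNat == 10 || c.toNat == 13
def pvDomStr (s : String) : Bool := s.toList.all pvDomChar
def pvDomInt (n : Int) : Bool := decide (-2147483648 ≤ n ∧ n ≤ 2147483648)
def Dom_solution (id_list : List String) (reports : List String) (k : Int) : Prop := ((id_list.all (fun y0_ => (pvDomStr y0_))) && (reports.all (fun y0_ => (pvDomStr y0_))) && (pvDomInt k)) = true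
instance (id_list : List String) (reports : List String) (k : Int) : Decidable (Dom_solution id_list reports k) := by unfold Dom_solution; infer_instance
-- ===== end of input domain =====

-- B replaces A's dict-of-dicts with a sentinel '#' counter key and its banned-side increment
-- passes by one dedup pass (vote counts + per-reporter target lists) and a direct per-reporter
-- count; same cost, simpler decomposition.

-- ===== PORT A =====
-- Port of A. The Python value True stored in cross_check[reporter][reported] is ported as 1
-- (only key membership is ever observed). Lookups that raise KeyError/IndexError in Python
-- (report with < 2 tokens, reporter/reported id missing from the dicts) are ported with
-- getD defaults; Pre_solution excludes exactly those raising inputs.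
def solution (id_list : List String) (reports : List String) (k : Int) : List Int :=
  -- for i in range(len(id_list)): cross_check[id_list[i]] = {'#': 0}; count[id_list[i]] = []
  let init : PySem.Dict String (PySem.Dict String Int) × PySem.Dict String (List String) :=
    (PySem.List.pyRange 0 (PySem.List.len id_list) 1).foldl
      (fun st i =>
        let id := PySem.List.pyGetD id_list i ""
        (st.1.insert id ((PySem.Dict.empty).insert "#" 0), st.2.insert id []))
      (PySem.Dict.empty, PySem.Dict.empty)
  -- for report in reports: dedup per (reporter, reported); count[reported].append(reporter)
  let st := reports.foldl
    (fun (st : PySem.Dict String (PySem.Dict String Int) × PySem.Dict String (List String)) report =>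
      let reporter := PySem.List.pyGetD (PySem.Str.split₀ report) 0 ""
      let reported := PySem.List.pyGetD (PySem.Str.split₀ report) 1 ""
      let d := (st.1.get? reporter).getD PySem.Dict.empty
      if d.contains reported = false then
        (st.1.insert reporter (d.insert reported 1),
         st.2.insert reported ((st.2.get? reported).getD [] ++ [reporter]))
      else st)
    init
  -- for id in id_list: if len(count[id]) >= k: for reporter in count[id]: cross_check[reporter]['#'] += 1
  let cc := id_list.foldl
    (fun cc id =>
      let lst := (st.2.get? id).getD []
      if PySem.List.len lst ≥ k then
        lst.foldl
          (fun cc reporter =>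
            cc.modify reporter PySem.Dict.empty (fun d => d.modify "#" 0 (· + 1)))
          cc
      else cc)
    st.1
  -- for id in id_list: answer.append(cross_check[id]['#'])
  id_list.map (fun id => ((cc.get? id).getD PySem.Dict.empty).getD "#" 0)

-- ===== PORT B =====
-- Port of B (Source B): one dedup pass over the reports building the pair set, the vote counter
-- and the per-reporter target lists, then a direct count per id of id_list.
def solution_alt (id_list : List String) (reports : List String) (k : Int) : List Int :=
  let st := reports.foldl
    (fun (st : PySem.Set (String × String) × PySem.Dict String Int × PySem.Dict String (List String)) r =>
      let t := PySem.Str.split₀ r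
      let pair := (PySem.List.pyGetD t 0 "", PySem.List.pyGetD t 1 "")
      if PySem.Set.contains st.1 pair then st
      else (PySem.Set.add st.1 pair,
            st.2.1.insert pair.2 (st.2.1.getD pair.2 0 + 1),
            st.2.2.modify pair.1 [] (· ++ [pair.2])))
    (PySem.Set.empty, PySem.Dict.empty, PySem.Dict.empty)
  id_list.map (fun i => ((st.2.2.getD i []).countP (fun red => st.2.1.getD red 0 ≥ k) : Int))

-- ===== PRECONDITION & SPEC =====
-- first / second whitespace-separated token of a report
def pvTok0 (r : String) : String := String.ofList ((PySem.Chars.split₀ r.toList).getD 0 [])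
def pvTok1 (r : String) : String := String.ofList ((PySem.Chars.split₀ r.toList).getD 1 [])

-- Pre_ excludes (a) inputs where A raises: a report with fewer than two tokens (IndexError),
-- a reporter — or a reported id other than the literal "#" — outside id_list (KeyError);
-- and (b) id_lists with duplicate ids, a duplicate-key corner on which A's per-occurrence
-- increment pass double-counts while B counts each banned id once.
def Pre_solution (id_list : List String) (reports : List String) (k : Int) : Prop :=
  id_list.Nodup ∧
  ∀ r ∈ reports, 2 ≤ (PySem.Chars.split₀ r.toList).length ∧
    pvTok0 r ∈ id_list ∧ (pvTok1 r ∈ id_list ∨ pvTok1 r = "#")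
instance (id_list : List String) (reports : List String) (k : Int) : Decidable (Pre_solution id_list reports k) := by unfold Pre_solution; infer_instance

def pvWitness_solution : List String × List String × Int := (["a", "b"], ["a b", "b a"], 2)

-- Reports whose reported id is the literal "#" collide with the sentinel key under which A
-- keeps its counters, so A silently ignores them; when at least k distinct users report "#",
-- A returns tallies that ignore those reports while B counts them — B's value is the
-- intended one (the sentinel collision is an accident of A's encoding).
def D_solution (id_list : List String) (reports : List String) (k : Int) : Prop :=
  max 1 k ≤ ((PySem.Set.ofList ((reports.filter (fun r => pvTok1 r == "#")).map pvTok0)).length : Int)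
instance (id_list : List String) (reports : List String) (k : Int) : Decidable (D_solution id_list reports k) := by unfold D_solution; infer_instance

def Spec_solution (id_list : List String) (reports : List String) (k : Int) (out : List Int) : Prop := ¬ D_solution id_list reports k → out = solution_alt id_list reports k
instance (id_list : List String) (reports : List String) (k : Int) (out : List Int) : Decidable (Spec_solution id_list reports k out) := by unfold Spec_solution; infer_instance

def pvDiffWitness_solution : List String × List String × Int := (["a", "#"], ["a #"], 1)
def pvDiffWitnessOut_solution : (List Int) × (List Int) := ([0, 0], [1, 0])

-- ===== CLAIM (what is proved, stated in full; the proofs are below) =====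
def Claim_unchanged_solution : Prop := ∀ (id_list : List String) (reports : List String) (k : Int), Dom_solution id_list reports k → Pre_solution id_list reports k → Spec_solution id_list reports k (solution id_list reports k)
def Claim_exact_solution : Prop := ∀ (id_list : List String) (reports : List String) (k : Int), Dom_solution id_list reports k → Pre_solution id_list reports k → D_solution id_list reports k → solution id_list reports k ≠ solution_alt id_list reports k
def Claim_changed_solution : Prop := Dom_solution (pvDiffWitness_solution.1) (pvDiffWitness_solution.2.1) (pvDiffWitness_solution.2.2) ∧ Pre_solution (pvDiffWitness_solution.1) (pvDiffWitness_solution.2.1) (pvDiffWitness_solution.2.2) ∧ D_solution (pvDiffWitness_solution.1) (pvDiffWitness_solution.2.1) (pvDiffWitness_solution.2.2) ∧ solution (pvDiffWitness_solution.1) (pvDiffWitness_solution.2.1) (pvDiffWitness_solution.2.2) = pvDiffWitnessOut_solution.1 ∧ solution_alt (pvDiffWitness_solution.1) (pvDiffWitness_solution.2.1) (pvDiffWitness_solution.2.2) = pvDiffWitnessOut_solution.2 ∧ pvDiffWitnessOut_solution.1 ≠ pvDiffWitnessOut_solution.2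
-- ===== LEMMAS AND PROOFS =====

lemma pvTok0_eq (r : String) : pvTok0 r = (PySem.Str.split₀ r).getD 0 "" := by
  unfold pvTok0
  rw [← PySem.Str.split₀_map_toList]
  rcases h : PySem.Str.split₀ r with _ | ⟨a, t⟩ <;> simp

lemma pvTok1_eq (r : String) : pvTok1 r = (PySem.Str.split₀ r).getD 1 "" := by
  unfold pvTok1
  rw [← PySem.Str.split₀_map_toList]
  rcases h : PySem.Str.split₀ r with _ | ⟨a, _ | ⟨b, t⟩⟩ <;> simp

-- the (reporter, reported) token pair of a report
def pvPair (r : String) : String × String := (pvTok0 r, pvTok1 r)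

-- the deduplicated report pairs, in first-occurrence order
def pvQ (reports : List String) : List (String × String) :=
  PySem.Set.ofList (reports.map pvPair)

-- number of distinct reporters of x (B's votes), as an Int
def pvVotes (reports : List String) (x : String) : Int :=
  ((pvQ reports).countP (fun p => p.2 == x) : Int)

-- the distinct ids reported by i, in order (B's targets)
def pvT (reports : List String) (i : String) : List String :=
  ((pvQ reports).filter (fun p => p.1 == i)).map Prod.snd

-- ---------- generic list/set helpers ----------

lemma pvOfList_append_singleton {α : Type} [BEq α] (P : List α) (q : α) :
    PySem.Set.ofList (P ++ [q]) = PySem.Set.add (PySem.Set.ofList P) q := by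
  simp [PySem.Set.ofList_eq_foldl, List.foldl_append]

lemma pvNodup_map_fst_filter_snd (l : List (String × String)) (hl : l.Nodup) (c : String) :
    ((l.filter (fun p => p.2 == c)).map Prod.fst).Nodup := by
  refine List.Nodup.map_on ?_ (hl.filter _)
  intro x hx y hy hxy
  have hx2 : x.2 = c := by simpa using (List.mem_filter.mp hx).2
  have hy2 : y.2 = c := by simpa using (List.mem_filter.mp hy).2
  exact Prod.ext hxy (hx2.trans hy2.symm)

lemma pvNodup_map_snd_filter_fst (l : List (String × String)) (hl : l.Nodup) (c : String) :
    ((l.filter (fun p => p.1 == c)).map Prod.snd).Nodup := by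
  refine List.Nodup.map_on ?_ (hl.filter _)
  intro x hx y hy hxy
  have hx1 : x.1 = c := by simpa using (List.mem_filter.mp hx).2
  have hy1 : y.1 = c := by simpa using (List.mem_filter.mp hy).2
  exact Prod.ext (hx1.trans hy1.symm) hxy

lemma pvMem_map_fst_filter_snd (l : List (String × String)) (c x : String) :
    x ∈ (l.filter (fun p => p.2 == c)).map Prod.fst ↔ (x, c) ∈ l := by
  simp only [List.mem_map, List.mem_filter, beq_iff_eq]
  constructor
  · rintro ⟨p, ⟨hp, h2⟩, h1⟩
    have : p = (x, c) := Prod.ext h1 h2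
    rwa [this] at hp
  · intro h; exact ⟨(x, c), ⟨h, rfl⟩, rfl⟩

lemma pvMem_map_snd_filter_fst (l : List (String × String)) (c y : String) :
    y ∈ (l.filter (fun p => p.1 == c)).map Prod.snd ↔ (c, y) ∈ l := by
  simp only [List.mem_map, List.mem_filter, beq_iff_eq]
  constructor
  · rintro ⟨p, ⟨hp, h1⟩, h2⟩
    have : p = (c, y) := Prod.ext h1 h2
    rwa [this] at hp
  · intro h; exact ⟨(c, y), ⟨h, rfl⟩, rfl⟩

lemma pvNodupQ (reports : List String) : (pvQ reports).Nodup := PySem.Set.nodup_ofList _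

lemma pvCountP_eq_of_nodup_mem_iff (l₁ l₂ : List String) (p : String → Bool)
    (h₁ : l₁.Nodup) (h₂ : l₂.Nodup)
    (h : ∀ x, (x ∈ l₁ ∧ p x = true) ↔ (x ∈ l₂ ∧ p x = true)) :
    l₁.countP p = l₂.countP p := by
  rw [List.countP_eq_length_filter, List.countP_eq_length_filter]
  exact ((List.perm_ext_iff_of_nodup (List.Nodup.filter _ h₁) (List.Nodup.filter _ h₂)).mpr
    (by intro a; simp only [List.mem_filter]; exact h a)).length_eq

-- ===== B-side characterization =====

def pvBStep (st : PySem.Set (String × String) × PySem.Dict String Int × PySem.Dict String (List String))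
    (r : String) : PySem.Set (String × String) × PySem.Dict String Int × PySem.Dict String (List String) :=
  let t := PySem.Str.split₀ r
  let pair := (PySem.List.pyGetD t 0 "", PySem.List.pyGetD t 1 "")
  if PySem.Set.contains st.1 pair then st
  else (PySem.Set.add st.1 pair,
        st.2.1.insert pair.2 (st.2.1.getD pair.2 0 + 1),
        st.2.2.modify pair.1 [] (· ++ [pair.2]))

lemma pvSolution_alt_eq (id_list reports : List String) (k : Int) :
    solution_alt id_list reports k =
      id_list.map (fun i =>
        (((reports.foldl pvBStep (PySem.Set.empty, PySem.Dict.empty, PySem.Dict.empty)).2.2.getD i []).countP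
          (fun red => (reports.foldl pvBStep (PySem.Set.empty, PySem.Dict.empty, PySem.Dict.empty)).2.1.getD red 0 ≥ k) : Int)) := rfl

def pvInvB (P : List (String × String))
    (st : PySem.Set (String × String) × PySem.Dict String Int × PySem.Dict String (List String)) : Prop :=
  st.1 = PySem.Set.ofList P ∧
  (∀ x, st.2.1.getD x 0 = ((PySem.Set.ofList P).countP (fun p => p.2 == x) : Int)) ∧
  (∀ i, st.2.2.getD i [] = ((PySem.Set.ofList P).filter (fun p => p.1 == i)).map Prod.snd)

lemma pvInvB_step (P : List (String × String)) (st) (r : String) (h : pvInvB P st) :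
    pvInvB (P ++ [pvPair r]) (pvBStep st r) := by
  obtain ⟨h1, h2, h3⟩ := h
  have hof := pvOfList_append_singleton P (pvPair r)
  have hp1 : PySem.List.pyGetD (PySem.Str.split₀ r) 0 "" = (pvPair r).1 := by
    rw [pvPair, pvTok0_eq]
    simp [pysem]
  have hp2 : PySem.List.pyGetD (PySem.Str.split₀ r) 1 "" = (pvPair r).2 := by
    rw [pvPair, pvTok1_eq]
    simp [pysem]
  simp only [pvBStep]
  rw [hp1, hp2, Prod.mk.eta]
  by_cases hm : pvPair r ∈ PySem.Set.ofList P
  · rw [if_pos (by rw [h1]; exact (PySem.Set.contains_iff _ _).mpr hm)]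
    unfold pvInvB
    rw [hof, PySem.Set.add_of_mem hm]
    exact ⟨h1, h2, h3⟩
  · rw [if_neg (by rw [h1]; intro hc; exact hm ((PySem.Set.contains_iff _ _).mp hc))]
    unfold pvInvB
    rw [hof, PySem.Set.add_of_not_mem hm]
    refine ⟨by show st.1.add (pvPair r) = _; rw [h1, PySem.Set.add_of_not_mem hm], ?_, ?_⟩
    · intro x
      rw [PySem.Dict.getD_insert, List.countP_append]
      by_cases hx : x = (pvPair r).2
      · subst hx
        rw [if_pos rfl, h2]
        push_cast
        simp
      · rw [if_neg hx, h2]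
        simp [Ne.symm hx]
    · intro i
      rw [PySem.Dict.getD_modify, List.filter_append, List.map_append]
      by_cases hi : i = (pvPair r).1
      · subst hi
        rw [if_pos rfl, h3]
        simp
      · rw [if_neg hi, h3]
        simp [Ne.symm hi]

lemma pvInvB_fold (l : List String) : ∀ (P : List (String × String)) st, pvInvB P st →
    pvInvB (P ++ l.map pvPair) (l.foldl pvBStep st) := by
  induction l with
  | nil => intro P st h; simpa using h
  | cons r t ih =>
    intro P st h
    have := ih (P ++ [pvPair r]) (pvBStep st r) (pvInvB_step P st r h)
    simpa using this

lemma pvInvB_result (reports : List String) :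
    pvInvB (reports.map pvPair) (reports.foldl pvBStep (PySem.Set.empty, PySem.Dict.empty, PySem.Dict.empty)) := by
  have := pvInvB_fold reports [] (PySem.Set.empty, PySem.Dict.empty, PySem.Dict.empty)
    ⟨rfl, by intro x; simp [PySem.Dict.getD_empty], by intro i; simp [PySem.Dict.getD_empty]⟩
  simpa using this

-- ===== A-side characterization =====

def pvAStep2 (st : PySem.Dict String (PySem.Dict String Int) × PySem.Dict String (List String))
    (report : String) : PySem.Dict String (PySem.Dict String Int) × PySem.Dict String (List String) :=
  let reporter := PySem.List.pyGetD (PySem.Str.split₀ report) 0 ""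
  let reported := PySem.List.pyGetD (PySem.Str.split₀ report) 1 ""
  let d := (st.1.get? reporter).getD PySem.Dict.empty
  if d.contains reported = false then
    (st.1.insert reporter (d.insert reported 1),
     st.2.insert reported ((st.2.get? reported).getD [] ++ [reporter]))
  else st

def pvAStep3 (cnt : PySem.Dict String (List String)) (k : Int)
    (cc : PySem.Dict String (PySem.Dict String Int)) (id : String) :
    PySem.Dict String (PySem.Dict String Int) :=
  let lst := (cnt.get? id).getD []
  if PySem.List.len lst ≥ k then
    lst.foldl (fun cc reporter => cc.modify reporter PySem.Dict.empty (fun d => d.modify "#" 0 (· + 1))) cc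
  else cc

lemma pvSolution_eq (id_list reports : List String) (k : Int) :
    solution id_list reports k =
      id_list.map (fun id =>
        (((id_list.foldl
            (pvAStep3 (reports.foldl pvAStep2
              (id_list.foldl (fun c id => c.insert id ((PySem.Dict.empty).insert "#" (0 : Int))) PySem.Dict.empty,
               id_list.foldl (fun c id => c.insert id ([] : List String)) PySem.Dict.empty)).2 k)
            (reports.foldl pvAStep2
              (id_list.foldl (fun c id => c.insert id ((PySem.Dict.empty).insert "#" (0 : Int))) PySem.Dict.empty,
               id_list.foldl (fun c id => c.insert id ([] : List String)) PySem.Dict.empty)).1).get? id).getD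
          PySem.Dict.empty).getD "#" 0) := by
  simp only [solution]
  rw [PySem.List.foldl_pyRange_pyGetD id_list ""
    (fun (st : PySem.Dict String (PySem.Dict String Int) × PySem.Dict String (List String)) id =>
      (st.1.insert id ((PySem.Dict.empty).insert "#" (0 : Int)), st.2.insert id ([] : List String)))
    (PySem.Dict.empty, PySem.Dict.empty) (le_refl 0)]
  simp only [Int.toNat_zero, List.drop_zero]
  rw [PySem.List.foldl_prod_mk
    (fun (c : PySem.Dict String (PySem.Dict String Int)) id => c.insert id ((PySem.Dict.empty).insert "#" (0 : Int)))
    (fun (c : PySem.Dict String (List String)) id => c.insert id ([] : List String))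
    id_list PySem.Dict.empty PySem.Dict.empty]
  rfl

def pvInvA (id_list : List String) (P : List (String × String))
    (st : PySem.Dict String (PySem.Dict String Int) × PySem.Dict String (List String)) : Prop :=
  (∀ j, j ∉ id_list → st.1.get? j = none) ∧
  (∀ j ∈ id_list, ∃ d, st.1.get? j = some d ∧ d.getD "#" 0 = 0 ∧
      ∀ y, (d.contains y = true ↔ (y = "#" ∨ (j, y) ∈ PySem.Set.ofList P))) ∧
  (∀ x, st.2.getD x [] =
      if x = "#" then [] else ((PySem.Set.ofList P).filter (fun p => p.2 == x)).map Prod.fst)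

lemma pvGet?_foldl_insert_const {ν : Type} (l : List String) (V : ν) (c : PySem.Dict String ν) (x : String) :
    (l.foldl (fun d id => d.insert id V) c).get? x = if x ∈ l then some V else c.get? x := by
  induction l generalizing c with
  | nil => simp
  | cons a t ih =>
    simp only [List.foldl_cons, ih, PySem.Dict.get?_insert]
    by_cases hx : x ∈ t
    · simp [hx]
    · by_cases hxa : x = a <;> simp [hx, hxa]

lemma pvInvA_init (id_list : List String) :
    pvInvA id_list []
      (id_list.foldl (fun c id => c.insert id ((PySem.Dict.empty).insert "#" (0 : Int))) PySem.Dict.empty,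
       id_list.foldl (fun c id => c.insert id ([] : List String)) PySem.Dict.empty) := by
  refine ⟨?_, ?_, ?_⟩
  · intro j hj
    rw [pvGet?_foldl_insert_const, if_neg hj, PySem.Dict.get?_empty]
  · intro j hj
    refine ⟨(PySem.Dict.empty).insert "#" 0, ?_, ?_, ?_⟩
    · rw [pvGet?_foldl_insert_const, if_pos hj]
    · rw [PySem.Dict.getD_insert_self]
    · intro y
      rw [PySem.Dict.contains_insert]
      simp [PySem.Dict.contains_empty]
  · intro x
    rw [PySem.Dict.getD_eq_get?_getD, pvGet?_foldl_insert_const]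
    by_cases hx : x ∈ id_list <;> simp [hx, PySem.Dict.get?_empty]

lemma pvInvA_step (id_list : List String) (P : List (String × String)) (st) (r : String)
    (hr0 : pvTok0 r ∈ id_list) (h : pvInvA id_list P st) :
    pvInvA id_list (P ++ [pvPair r]) (pvAStep2 st r) := by
  obtain ⟨h1, h2, h3⟩ := h
  obtain ⟨d, hd, hdh, hdc⟩ := h2 (pvTok0 r) hr0
  have hp1 : PySem.List.pyGetD (PySem.Str.split₀ r) 0 "" = pvTok0 r := by
    rw [pvTok0_eq]
    simp [pysem]
  have hp2 : PySem.List.pyGetD (PySem.Str.split₀ r) 1 "" = pvTok1 r := by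
    rw [pvTok1_eq]
    simp [pysem]
  have hofq : PySem.Set.ofList (P ++ [pvPair r]) =
      if pvPair r ∈ PySem.Set.ofList P then PySem.Set.ofList P else PySem.Set.ofList P ++ [pvPair r] := by
    rw [pvOfList_append_singleton]
    by_cases hm : pvPair r ∈ PySem.Set.ofList P
    · rw [if_pos hm, PySem.Set.add_of_mem hm]
    · rw [if_neg hm, PySem.Set.add_of_not_mem hm]
  simp only [pvAStep2, hp1, hp2, hd, Option.getD_some]
  by_cases hb : d.contains (pvTok1 r) = true
  · rw [if_neg (by simp [hb])]
    have hcase := (hdc (pvTok1 r)).mp hb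
    refine ⟨h1, ?_, ?_⟩
    · intro j hj
      obtain ⟨dj, hdj, hdjh, hdjc⟩ := h2 j hj
      refine ⟨dj, hdj, hdjh, ?_⟩
      intro y
      rw [hdjc y, hofq]
      by_cases hm : pvPair r ∈ PySem.Set.ofList P
      · rw [if_pos hm]
      · rw [if_neg hm]
        have hy : pvTok1 r = "#" := by
          rcases hcase with hsharp | hmem
          · exact hsharp
          · exact absurd hmem hm
        constructor
        · rintro (h | h)
          · exact Or.inl h
          · exact Or.inr (List.mem_append_left _ h)
        · rintro (h | h)
          · exact Or.inl h
          · rcases List.mem_append.mp h with h | h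
            · exact Or.inr h
            · left
              have : (j, y) = pvPair r := by simpa using h
              have : y = pvTok1 r := congrArg Prod.snd this
              rw [this, hy]
    · intro x
      rw [h3 x, hofq]
      by_cases hm : pvPair r ∈ PySem.Set.ofList P
      · rw [if_pos hm]
      · rw [if_neg hm]
        have hy : pvTok1 r = "#" := by
          rcases hcase with hsharp | hmem
          · exact hsharp
          · exact absurd hmem hm
        by_cases hx : x = "#"
        · simp [hx]
        · rw [if_neg hx, if_neg hx, List.filter_append, List.map_append]
          have hfil : (List.filter (fun p => p.2 == x) [pvPair r]) = [] := by
            simp [pvPair, hy]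
            exact fun hc => hx hc.symm
          rw [hfil]
          simp
  · rw [if_pos (by simpa using hb)]
    have hy : pvTok1 r ≠ "#" := by
      intro hc
      exact hb ((hdc _).mpr (Or.inl hc))
    have hqn : pvPair r ∉ PySem.Set.ofList P := by
      intro hc
      exact hb ((hdc _).mpr (Or.inr hc))
    have hnew : PySem.Set.ofList (P ++ [pvPair r]) = PySem.Set.ofList P ++ [pvPair r] := by
      rw [hofq, if_neg hqn]
    refine ⟨?_, ?_, ?_⟩
    · intro j hj
      rw [PySem.Dict.get?_insert, if_neg (by rintro rfl; exact hj hr0), h1 j hj]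
    · intro j hj
      by_cases hji : j = pvTok0 r
      · subst hji
        refine ⟨d.insert (pvTok1 r) 1, ?_, ?_, ?_⟩
        · rw [PySem.Dict.get?_insert, if_pos rfl]
        · rw [PySem.Dict.getD_insert, if_neg (by exact fun hc => hy hc.symm), hdh]
        · intro y
          rw [PySem.Dict.contains_insert, hnew]
          constructor
          · intro hc
            rcases Bool.or_eq_true_iff.mp hc with hc | hc
            · right
              exact List.mem_append_right _ (by simp [pvPair, beq_iff_eq.mp hc])
            · rcases (hdc y).mp hc with hc | hc
              · exact Or.inl hc
              · exact Or.inr (List.mem_append_left _ hc)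
          · rintro (hc | hc)
            · exact Bool.or_eq_true_iff.mpr (Or.inr ((hdc y).mpr (Or.inl hc)))
            · rcases List.mem_append.mp hc with hc | hc
              · exact Bool.or_eq_true_iff.mpr (Or.inr ((hdc y).mpr (Or.inr hc)))
              · have : y = pvTok1 r := congrArg Prod.snd (by simpa using hc)
                exact Bool.or_eq_true_iff.mpr (Or.inl (by simp [this]))
      · obtain ⟨dj, hdj, hdjh, hdjc⟩ := h2 j hj
        refine ⟨dj, ?_, hdjh, ?_⟩
        · rw [PySem.Dict.get?_insert, if_neg hji, hdj]
        · intro y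
          rw [hdjc y, hnew]
          constructor
          · rintro (h | h)
            · exact Or.inl h
            · exact Or.inr (List.mem_append_left _ h)
          · rintro (h | h)
            · exact Or.inl h
            · rcases List.mem_append.mp h with h | h
              · exact Or.inr h
              · exact absurd (congrArg Prod.fst (by simpa using h)) hji
    · intro x
      rw [PySem.Dict.getD_eq_get?_getD, PySem.Dict.get?_insert]
      by_cases hx : x = pvTok1 r
      · subst hx
        rw [if_pos rfl, Option.getD_some, hnew, ← PySem.Dict.getD_eq_get?_getD, h3,
            if_neg hy, List.filter_append, List.map_append]
        have : (List.filter (fun p => p.2 == pvTok1 r) [pvPair r]) = [pvPair r] := by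
          simp [pvPair]
        rw [this, if_neg hy]
        simp [pvPair]
      · rw [if_neg hx, ← PySem.Dict.getD_eq_get?_getD, h3, hnew]
        by_cases hxs : x = "#"
        · simp [hxs]
        · rw [if_neg hxs, if_neg hxs, List.filter_append, List.map_append]
          have : (List.filter (fun p => p.2 == x) [pvPair r]) = [] := by
            simp [pvPair]
            exact fun hc => absurd hc.symm hx
          rw [this]
          simp

lemma pvInvA_fold (id_list : List String) : ∀ (l : List String), (∀ r ∈ l, pvTok0 r ∈ id_list) →
    ∀ P st, pvInvA id_list P st → pvInvA id_list (P ++ l.map pvPair) (l.foldl pvAStep2 st) := by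
  intro l
  induction l with
  | nil => intro _ P st h; simpa using h
  | cons r t ih =>
    intro hpre P st h
    have := ih (fun s hs => hpre s (List.mem_cons_of_mem _ hs)) (P ++ [pvPair r]) (pvAStep2 st r)
      (pvInvA_step id_list P st r (hpre r List.mem_cons_self) h)
    simpa using this

-- what count[x] holds after A's dedup loop
def pvL (reports : List String) (x : String) : List String :=
  if x = "#" then [] else ((pvQ reports).filter (fun p => p.2 == x)).map Prod.fst

lemma pvInvA_result (id_list reports : List String)
    (hpre : ∀ r ∈ reports, pvTok0 r ∈ id_list) :
    pvInvA id_list (reports.map pvPair)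
      (reports.foldl pvAStep2
        (id_list.foldl (fun c id => c.insert id ((PySem.Dict.empty).insert "#" (0 : Int))) PySem.Dict.empty,
         id_list.foldl (fun c id => c.insert id ([] : List String)) PySem.Dict.empty)) := by
  have := pvInvA_fold id_list reports hpre [] _ (pvInvA_init id_list)
  simpa using this

-- the '#' tally of cross_check[j]
def pvG (cc : PySem.Dict String (PySem.Dict String Int)) (j : String) : Int :=
  ((cc.get? j).getD PySem.Dict.empty).getD "#" 0

lemma pvG_eq (cc : PySem.Dict String (PySem.Dict String Int)) (j : String) :
    pvG cc j = (cc.getD j PySem.Dict.empty).getD "#" 0 := by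
  unfold pvG
  rw [PySem.Dict.getD_eq_get?_getD cc j PySem.Dict.empty]

lemma pvG_modify (cc : PySem.Dict String (PySem.Dict String Int)) (r j : String) :
    pvG (cc.modify r PySem.Dict.empty (fun d => d.modify "#" 0 (· + 1))) j
      = if j = r then pvG cc j + 1 else pvG cc j := by
  rw [pvG_eq, PySem.Dict.getD_modify]
  by_cases hj : j = r
  · rw [if_pos hj, if_pos hj, PySem.Dict.getD_modify_self, pvG_eq, hj]
  · rw [if_neg hj, if_neg hj, pvG_eq]

lemma pvG_incr_fold (lst : List String) : ∀ cc (j : String),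
    pvG (lst.foldl (fun cc reporter =>
        cc.modify reporter PySem.Dict.empty (fun d => d.modify "#" 0 (· + 1))) cc) j
      = pvG cc j + (lst.count j : Int) := by
  induction lst with
  | nil => intro cc j; simp
  | cons a t ih =>
    intro cc j
    rw [List.foldl_cons, ih, pvG_modify, List.count_cons]
    by_cases hj : j = a
    · rw [if_pos hj, hj]
      simp only [BEq.rfl, if_true]
      push_cast
      ring
    · rw [if_neg hj]
      have : (a == j) = false := by simpa using Ne.symm hj
      rw [this]
      push_cast
      ring

lemma pvLoop3 (cnt : PySem.Dict String (List String)) (k : Int) (l : List String) :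
    ∀ cc (j : String),
    pvG (l.foldl (pvAStep3 cnt k) cc) j
      = pvG cc j + ((l.map (fun x =>
          if PySem.List.len (cnt.getD x []) ≥ k then ((cnt.getD x []).count j : Int) else 0)).sum) := by
  induction l with
  | nil => intro cc j; simp
  | cons a t ih =>
    intro cc j
    rw [List.foldl_cons, ih, List.map_cons, List.sum_cons]
    simp only [pvAStep3, ← PySem.Dict.getD_eq_get?_getD]
    by_cases hc : PySem.List.len (cnt.getD a []) ≥ k
    · rw [if_pos hc, if_pos hc, pvG_incr_fold]
      ring
    · rw [if_neg hc, if_neg hc]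
      ring

-- A's vote count for "#" is the size of the set of distinct reporters of "#"
lemma pvVotes_hash (reports : List String) :
    pvVotes reports "#"
      = ((PySem.Set.ofList ((reports.filter (fun r => pvTok1 r == "#")).map pvTok0)).length : Int) := by
  unfold pvVotes
  have h1 : (((pvQ reports).filter (fun p => p.2 == "#")).map Prod.fst).Perm
      (PySem.Set.ofList ((reports.filter (fun r => pvTok1 r == "#")).map pvTok0)) := by
    rw [List.perm_ext_iff_of_nodup (pvNodup_map_fst_filter_snd _ (pvNodupQ reports) _)
      (PySem.Set.nodup_ofList _)]
    intro x
    rw [pvMem_map_fst_filter_snd, PySem.Set.mem_ofList]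
    unfold pvQ
    rw [PySem.Set.mem_ofList]
    simp only [List.mem_map, List.mem_filter, beq_iff_eq]
    constructor
    · rintro ⟨r, hr, hpr⟩
      exact ⟨r, ⟨hr, congrArg Prod.snd hpr⟩, congrArg Prod.fst hpr⟩
    · rintro ⟨r, ⟨hr, h2⟩, h1⟩
      exact ⟨r, hr, Prod.ext h1 h2⟩
  rw [List.countP_eq_length_filter, ← h1.length_eq, List.length_map]

-- A's per-x loop-3 summand is a 0/1 indicator
def pvPx (reports : List String) (k : Int) (i x : String) : Bool :=
  !(x == "#") && decide (pvVotes reports x ≥ k) && decide ((i, x) ∈ pvQ reports)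

lemma pvA_term (reports : List String) (k : Int) (i x : String) :
    (if PySem.List.len (pvL reports x) ≥ k then ((pvL reports x).count i : Int) else 0)
      = if pvPx reports k i x then 1 else 0 := by
  unfold pvPx
  by_cases hxs : x = "#"
  · subst hxs
    unfold pvL
    rw [if_pos rfl]
    simp
  · unfold pvL
    rw [if_neg hxs]
    have hlen : PySem.List.len (((pvQ reports).filter (fun p => p.2 == x)).map Prod.fst)
        = pvVotes reports x := by
      rw [PySem.List.len_eq, List.length_map, ← List.countP_eq_length_filter]
      rfl
    have hcnt : ((((pvQ reports).filter (fun p => p.2 == x)).map Prod.fst).count i : Int)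
        = if (i, x) ∈ pvQ reports then 1 else 0 := by
      by_cases hm : (i, x) ∈ pvQ reports
      · rw [if_pos hm]
        have hmem' : i ∈ ((pvQ reports).filter (fun p => p.2 == x)).map Prod.fst :=
          (pvMem_map_fst_filter_snd _ _ _).mpr hm
        have hnd' := pvNodup_map_fst_filter_snd _ (pvNodupQ reports) x
        have hle := List.nodup_iff_count_le_one.mp hnd' i
        have hgt := List.count_pos_iff.mpr hmem'
        have : (((pvQ reports).filter (fun p => p.2 == x)).map Prod.fst).count i = 1 := by omega
        rw [this]
        rfl
      · rw [if_neg hm, List.count_eq_zero.mpr]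
        · rfl
        · intro hc
          exact hm ((pvMem_map_fst_filter_snd _ _ _).mp hc)
    rw [hlen, hcnt]
    by_cases hv : pvVotes reports x ≥ k
    · rw [if_pos hv]
      by_cases hm : (i, x) ∈ pvQ reports <;> simp [hm, hxs, hv]
    · rw [if_neg hv]
      simp [hv]

-- A's output, characterized: at each id i, the number of ids x of id_list with enough votes
-- that i reported
lemma pvA_char (id_list reports : List String) (k : Int)
    (hrep0 : ∀ r ∈ reports, pvTok0 r ∈ id_list) :
    solution id_list reports k
      = id_list.map (fun i => (id_list.countP (pvPx reports k i) : Int)) := by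
  obtain ⟨ha1, ha2, ha3⟩ := pvInvA_result id_list reports hrep0
  rw [pvSolution_eq]
  apply List.map_congr_left
  intro i hi
  show pvG _ i = _
  rw [pvLoop3]
  have hG0 : pvG (reports.foldl pvAStep2
      (id_list.foldl (fun c id => c.insert id ((PySem.Dict.empty).insert "#" (0 : Int))) PySem.Dict.empty,
       id_list.foldl (fun c id => c.insert id ([] : List String)) PySem.Dict.empty)).1 i = 0 := by
    obtain ⟨d, hd, hdh, _⟩ := ha2 i hi
    unfold pvG
    rw [hd, Option.getD_some, hdh]
  rw [hG0, zero_add]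
  have ha3' : ∀ x, (reports.foldl pvAStep2
      (id_list.foldl (fun c id => c.insert id ((PySem.Dict.empty).insert "#" (0 : Int))) PySem.Dict.empty,
       id_list.foldl (fun c id => c.insert id ([] : List String)) PySem.Dict.empty)).2.getD x []
      = pvL reports x := ha3
  simp only [ha3']
  rw [List.map_congr_left (fun x _ => pvA_term reports k i x), PySem.List.sum_map_ite_one_zero]

-- B's output, characterized: at each id i, the number of i's distinct targets with enough votes
lemma pvB_char (id_list reports : List String) (k : Int) :
    solution_alt id_list reports k
      = id_list.map (fun i => ((pvT reports i).countP (fun red => decide (pvVotes reports red ≥ k)) : Int)) := by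
  obtain ⟨hb1, hb2, hb3⟩ := pvInvB_result reports
  rw [pvSolution_alt_eq]
  apply List.map_congr_left
  intro i _
  simp only [hb2, hb3]
  rfl

-- counting over id_list equals counting over i's target list (both are Nodup, same members)
lemma pvCountP_id_T (id_list reports : List String) (k : Int)
    (hnd : id_list.Nodup)
    (hmem : ∀ p ∈ pvQ reports, p.1 ∈ id_list ∧ (p.2 ∈ id_list ∨ p.2 = "#"))
    (i : String) :
    id_list.countP (pvPx reports k i) = (pvT reports i).countP (pvPx reports k i) := by
  have hTmem : ∀ y, y ∈ pvT reports i ↔ (i, y) ∈ pvQ reports := fun y =>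
    pvMem_map_snd_filter_fst (pvQ reports) i y
  apply pvCountP_eq_of_nodup_mem_iff _ _ _ hnd (pvNodup_map_snd_filter_fst _ (pvNodupQ reports) i)
  intro x
  unfold pvPx
  constructor
  · rintro ⟨hx, hpx⟩
    refine ⟨?_, hpx⟩
    simp only [Bool.and_eq_true, Bool.not_eq_true', beq_eq_false_iff_ne, ne_eq,
      decide_eq_true_eq] at hpx
    exact (hTmem x).mpr hpx.2
  · rintro ⟨hx, hpx⟩
    refine ⟨?_, hpx⟩
    simp only [Bool.and_eq_true, Bool.not_eq_true', beq_eq_false_iff_ne, ne_eq,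
      decide_eq_true_eq] at hpx
    rcases (hmem _ hpx.2).2 with h | h
    · exact h
    · exact absurd h hpx.1.1

-- on a Nodup list, flipping the predicate at one member raises the count by exactly one
lemma pvCountP_succ (p q : String → Bool) (a : String) :
    ∀ (l : List String), l.Nodup → a ∈ l → p a = false → q a = true →
    (∀ y ∈ l, y ≠ a → q y = p y) → l.countP q = l.countP p + 1 := by
  intro l
  induction l with
  | nil => intro _ ha; cases ha
  | cons b t ih =>
    intro hnd ha hpa hqa hpq
    rcases List.mem_cons.mp ha with rfl | hat
    · rw [List.countP_cons, List.countP_cons, hpa, hqa]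
      have ht : t.countP q = t.countP p := by
        apply List.countP_congr
        intro y hy
        have hya : y ≠ a := fun hc => (List.nodup_cons.mp hnd).1 (hc ▸ hy)
        rw [hpq y (List.mem_cons_of_mem _ hy) hya]
      simp [ht]
    · have hba : b ≠ a := fun hc => (List.nodup_cons.mp hnd).1 (hc ▸ hat)
      rw [List.countP_cons, List.countP_cons, hpq b List.mem_cons_self hba,
        ih (List.nodup_cons.mp hnd).2 hat hpa hqa
          (fun y hy hya => hpq y (List.mem_cons_of_mem _ hy) hya)]
      omega

lemma pvMap_ne (f g : String → Int) (l : List String) (s : String)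
    (hs : s ∈ l) (h : f s ≠ g s) : l.map f ≠ l.map g := by
  intro he
  obtain ⟨idx, hidx, heq⟩ := List.mem_iff_getElem.mp hs
  have h1 := congrArg (fun xs : List Int => xs[idx]?) he
  simp only [List.getElem?_map] at h1
  rw [List.getElem?_eq_getElem hidx] at h1
  simp [heq] at h1
  exact h h1

-- ===== VERDICT (by name: the statement is the Claim_ definition above) =====
theorem solution_spec : Claim_unchanged_solution := by
  intro id_list reports k hdom hpre
  unfold Spec_solution
  intro hnD
  obtain ⟨hnd, hrep⟩ := hpre
  unfold D_solution at hnD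
  have hmemQ : ∀ p ∈ pvQ reports, p.1 ∈ id_list ∧ (p.2 ∈ id_list ∨ p.2 = "#") := by
    intro p hp
    rw [pvQ, PySem.Set.mem_ofList] at hp
    obtain ⟨r, hr, rfl⟩ := List.mem_map.mp hp
    exact ⟨(hrep r hr).2.1, (hrep r hr).2.2⟩
  rw [pvA_char id_list reports k (fun r hr => (hrep r hr).2.1), pvB_char]
  apply List.map_congr_left
  intro i hi
  rw [pvCountP_id_T id_list reports k hnd hmemQ i]
  congr 1
  apply List.countP_congr
  intro y hy
  have hyQ : (i, y) ∈ pvQ reports := (pvMem_map_snd_filter_fst (pvQ reports) i y).mp hy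
  unfold pvPx
  simp only [Bool.and_eq_true, Bool.not_eq_true', beq_eq_false_iff_ne, ne_eq,
    decide_eq_true_eq]
  constructor
  · rintro ⟨⟨_, hv⟩, _⟩
    exact hv
  · intro hv
    refine ⟨⟨?_, hv⟩, hyQ⟩
    rintro rfl
    -- y = "#": its vote count is the size of the '#'-reporter set, contradicting ¬ D
    apply hnD
    have hpos : 0 < (pvQ reports).countP (fun p => p.2 == "#") :=
      List.countP_pos_iff.mpr ⟨(i, "#"), hyQ, by simp⟩
    have hv' := pvVotes_hash reports
    have hvc : pvVotes reports "#" = ((pvQ reports).countP (fun p => p.2 == "#") : Int) := rfl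
    omega

theorem solution_changed : Claim_changed_solution := by
  unfold Claim_changed_solution; decide

theorem solution_tight : Claim_exact_solution := by
  intro id_list reports k hdom hpre hD
  obtain ⟨hnd, hrep⟩ := hpre
  unfold D_solution at hD
  have hmemQ : ∀ p ∈ pvQ reports, p.1 ∈ id_list ∧ (p.2 ∈ id_list ∨ p.2 = "#") := by
    intro p hp
    rw [pvQ, PySem.Set.mem_ofList] at hp
    obtain ⟨r, hr, rfl⟩ := List.mem_map.mp hp
    exact ⟨(hrep r hr).2.1, (hrep r hr).2.2⟩
  -- a witness reporter of "#"
  have hSne : PySem.Set.ofList ((reports.filter (fun r => pvTok1 r == "#")).map pvTok0) ≠ [] := by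
    intro h0
    rw [h0] at hD
    simp at hD
  obtain ⟨s, hs⟩ := List.exists_mem_of_ne_nil _ hSne
  rw [PySem.Set.mem_ofList] at hs
  obtain ⟨r0, hr0f, hs0⟩ := List.mem_map.mp hs
  obtain ⟨hr0, hr0sharp⟩ := List.mem_filter.mp hr0f
  have hr0sharp' : pvTok1 r0 = "#" := by simpa using hr0sharp
  have hsid : s ∈ id_list := hs0 ▸ (hrep r0 hr0).2.1
  have hQs : (s, "#") ∈ pvQ reports := by
    rw [pvQ, PySem.Set.mem_ofList]
    exact List.mem_map.mpr ⟨r0, hr0, by rw [pvPair, hs0, hr0sharp']⟩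
  have hvsharp : pvVotes reports "#" ≥ k ∧ 1 ≤ pvVotes reports "#" := by
    have hv' := pvVotes_hash reports
    constructor <;> omega
  rw [pvA_char id_list reports k (fun r hr => (hrep r hr).2.1), pvB_char]
  apply pvMap_ne _ _ _ s hsid
  rw [pvCountP_id_T id_list reports k hnd hmemQ s]
  have hTsharp : "#" ∈ pvT reports s := (pvMem_map_snd_filter_fst (pvQ reports) s "#").mpr hQs
  have hstep : (pvT reports s).countP (fun red => decide (pvVotes reports red ≥ k))
      = (pvT reports s).countP (pvPx reports k s) + 1 := by
    apply pvCountP_succ (pvPx reports k s) (fun red => decide (pvVotes reports red ≥ k)) "#"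
      (pvT reports s) (pvNodup_map_snd_filter_fst _ (pvNodupQ reports) s) hTsharp
    · unfold pvPx
      simp
    · simpa using hvsharp.1
    · intro y hy hysharp
      have hyQ : (s, y) ∈ pvQ reports := (pvMem_map_snd_filter_fst (pvQ reports) s y).mp hy
      unfold pvPx
      by_cases hv : pvVotes reports y ≥ k <;> simp [hv, hysharp, hyQ]
  intro hc
  rw [hstep] at hc
  have := Int.ofNat.inj hc
  omega
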